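-- pv_equiv track=rewrite | github.com/brittCommit/code_challenges | mutateTheArray.py | mutateTheArray
-- ===== SOURCE A (Python) =====
-- def mutateTheArray(n, a):
--     """
--     Given an integer n and an array a of length n, your task is to apply the following mutation to a:
--
--     Array a mutates into a new array b of length n.
--     For each i from 0 to n - 1, b[i] = a[i - 1] + a[i] + a[i + 1].
--     If some element in the sum a[i - 1] + a[i] + a[i + 1] does not exist, it should be set to 0. For example, b[0] should be equal to 0 + a[0] + a[1].
--
--     >>> mutateTheArray (5, [4, 0, 1, -2, 3])
--     [4, 5, -1, 2, 1]
--
--     """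
--     if n < 2:
--         return a
--     b = []
--
--     for i in range(len(a)):
--         if i == 0:
--             b.append((a[i] + a[i+1]))
--         elif i == (len(a)-1):
--             b.append((a[i] + a[i-1]))
--         else:
--             b.append((a[i-1] + a[i] + a[i+1]))
--     return b
-- ===== SOURCE B (Python) =====
-- def mutateTheArray(n, a):
--     if n < 2:
--         return a
--     s = [0]
--     for x in a:
--         s.append(s[-1] + x)
--     m = len(a)
--     return [s[min(i + 2, m)] - s[max(i - 1, 0)] for i in range(m)]
-- ===== Notes on version B (the rewrite author's own statement) =====
-- stated objective: alternative
-- what changed: Replaced per-index neighbor lookups with a prefix-sum array: each output is computed as a range-sum difference s[min(i+2,m)] - s[max(i-1,0)] over the accumulated prefix sums, eliminating all neighbor indexing and edge branching.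
import Mathlib
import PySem

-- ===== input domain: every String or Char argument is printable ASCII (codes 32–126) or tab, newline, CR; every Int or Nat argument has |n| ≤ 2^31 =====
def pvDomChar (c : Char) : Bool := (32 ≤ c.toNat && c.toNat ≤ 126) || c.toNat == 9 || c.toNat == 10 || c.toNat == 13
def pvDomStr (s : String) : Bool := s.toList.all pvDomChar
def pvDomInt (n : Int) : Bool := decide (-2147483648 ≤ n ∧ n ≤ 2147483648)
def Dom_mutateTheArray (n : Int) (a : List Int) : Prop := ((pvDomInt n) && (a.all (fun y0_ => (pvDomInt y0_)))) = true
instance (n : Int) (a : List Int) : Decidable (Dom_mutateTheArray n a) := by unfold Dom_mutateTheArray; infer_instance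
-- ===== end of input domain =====

-- B replaces A's neighbor indexing with three-way edge branching by a prefix-sum array and
-- range-sum differences (objective: alternative algorithm, same O(n) cost).

-- ===== PORT A =====
-- pyGetD is exact here: under Pre_ every index the loop reads is in range (len a ≥ 2 or the loop is empty).
def mutateTheArray (n : Int) (a : List Int) : List Int :=
  if n < 2 then a
  else
    (List.range a.length).foldl (fun (b : List Int) (i : Nat) =>
      if i = 0 then
        b ++ [PySem.List.pyGetD a (↑i) 0 + PySem.List.pyGetD a (↑i + 1) 0]
      else if i = a.length - 1 then
        b ++ [PySem.List.pyGetD a (↑i) 0 + PySem.List.pyGetD a (↑i - 1) 0]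
      else
        b ++ [PySem.List.pyGetD a (↑i - 1) 0 + PySem.List.pyGetD a (↑i) 0 + PySem.List.pyGetD a (↑i + 1) 0]) []

-- ===== PORT B =====
-- s is built exactly as Source B builds it: start from [0], append last + x for each element.
-- All indexes into s are in range (0 ≤ idx ≤ len a = len s - 1), so getD is exact for s[idx].
def mutateTheArray_alt (n : Int) (a : List Int) : List Int :=
  if n < 2 then a
  else
    let s := a.foldl (fun (s : List Int) (x : Int) => s ++ [s.getLastD 0 + x]) [0]
    let m := a.length
    (List.range m).map (fun i => s.getD (min (i + 2) m) 0 - s.getD (max (i - 1) 0) 0)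

-- ===== PRECONDITION & SPEC =====
-- Pre_ excludes exactly the inputs on which A raises IndexError: n ≥ 2 with a one-element list
-- (A's i == 0 branch reads a[1] before the last-index branch can fire).
def Pre_mutateTheArray (n : Int) (a : List Int) : Prop := ¬ (2 ≤ n ∧ a.length = 1)
instance (n : Int) (a : List Int) : Decidable (Pre_mutateTheArray n a) := by unfold Pre_mutateTheArray; infer_instance
def pvWitness_mutateTheArray : Int × List Int := (5, [4, 0, 1, -2, 3])

def Spec_mutateTheArray (n : Int) (a : List Int) (out : List Int) : Prop := out = mutateTheArray_alt n a
instance (n : Int) (a : List Int) (out : List Int) : Decidable (Spec_mutateTheArray n a out) := by unfold Spec_mutateTheArray; infer_instance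

-- ===== CLAIM (what is proved, stated in full; the proofs are below) =====
def Claim_equal_mutateTheArray : Prop := ∀ (n : Int) (a : List Int), Dom_mutateTheArray n a → Pre_mutateTheArray n a → Spec_mutateTheArray n a (mutateTheArray n a)

-- ===== LEMMAS AND PROOFS =====

theorem getLastD_concat' (l : List Int) (x d : Int) : (l ++ [x]).getLastD d = x := by
  induction l with
  | nil => rfl
  | cons y ys ih => cases ys <;> simp_all

-- B's prefix-sum loop is scanl (+) starting from the tail value
theorem fold_eq_scanl (a : List Int) : ∀ (s1 : List Int) (t : Int),
    a.foldl (fun (s : List Int) (x : Int) => s ++ [s.getLastD 0 + x]) (s1 ++ [t])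
      = s1 ++ List.scanl (· + ·) t a := by
  induction a with
  | nil => intro s1 t; simp [List.scanl_nil]
  | cons x xs ih =>
    intro s1 t
    simp only [List.foldl_cons, getLastD_concat', List.scanl_cons]
    rw [ih (s1 ++ [t]) (t + x)]
    simp

theorem scan_getD (a : List Int) : ∀ (t : Int) (k : Nat), k ≤ a.length →
    (List.scanl (· + ·) t a).getD k 0 = t + (a.take k).sum := by
  induction a with
  | nil =>
    intro t k hk
    have hk0 : k = 0 := by simpa using hk
    subst hk0
    simp [List.scanl_nil]
  | cons x xs ih =>
    intro t k hk
    cases k with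
    | zero => simp [List.scanl_cons]
    | succ j =>
      simp only [List.scanl_cons, List.getD_cons_succ, List.take_succ_cons, List.sum_cons]
      rw [ih (t + x) j (by simpa using hk)]
      ring

theorem take_succ_sum (a : List Int) : ∀ (j : Nat), j < a.length →
    (a.take (j + 1)).sum = (a.take j).sum + a.getD j 0 := by
  induction a with
  | nil => intro j h; simp at h
  | cons x xs ih =>
    intro j hj
    cases j with
    | zero => simp
    | succ j =>
      simp only [List.take_succ_cons, List.sum_cons, List.getD_cons_succ]
      rw [ih j (by simpa using hj)]
      ring

theorem pointwise (a : List Int) (i : Nat) (h2 : 2 ≤ a.length) (hi : i < a.length) :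
    (if i = 0 then
        PySem.List.pyGetD a (↑i) 0 + PySem.List.pyGetD a (↑i + 1) 0
      else if i = a.length - 1 then
        PySem.List.pyGetD a (↑i) 0 + PySem.List.pyGetD a (↑i - 1) 0
      else
        PySem.List.pyGetD a (↑i - 1) 0 + PySem.List.pyGetD a (↑i) 0 + PySem.List.pyGetD a (↑i + 1) 0)
    = (a.take (min (i + 2) a.length)).sum - (a.take (max (i - 1) 0)).sum := by
  have c0 : PySem.List.pyGetD a (↑i) 0 = a.getD i 0 := PySem.List.pyGetD_natCast a i 0
  have c1 : PySem.List.pyGetD a (↑i + 1) 0 = a.getD (i + 1) 0 := by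
    rw [show (↑i : Int) + 1 = ↑(i + 1) from by push_cast; ring]
    exact PySem.List.pyGetD_natCast a (i + 1) 0
  by_cases h0 : i = 0
  · subst h0
    rw [if_pos rfl, c0, c1]
    have t1 : (a.take 1).sum = (a.take 0).sum + a.getD 0 0 := take_succ_sum a 0 (by omega)
    have t2 : (a.take 2).sum = (a.take 1).sum + a.getD 1 0 := take_succ_sum a 1 (by omega)
    simp only [show min (0 + 2) a.length = 2 from by omega, show max (0 - 1) 0 = 0 from rfl]
    simp [t2, t1]
  · have cm : PySem.List.pyGetD a (↑i - 1) 0 = a.getD (i - 1) 0 := by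
      rw [show (↑i : Int) - 1 = ↑(i - 1) from by omega]
      exact PySem.List.pyGetD_natCast a (i - 1) 0
    have hi1 : 1 ≤ i := by omega
    have hmax : max (i - 1) 0 = i - 1 := by omega
    have t0 : (a.take (i - 1 + 1)).sum = (a.take (i - 1)).sum + a.getD (i - 1) 0 :=
      take_succ_sum a (i - 1) (by omega)
    have hstep : i - 1 + 1 = i := by omega
    rw [if_neg h0, hmax]
    by_cases hl : i = a.length - 1
    · have hmin : min (i + 2) a.length = a.length := by omega
      have t1 : (a.take (i + 1)).sum = (a.take i).sum + a.getD i 0 := take_succ_sum a i hi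
      have hlen : i + 1 = a.length := by omega
      rw [if_pos hl, c0, cm, hmin, ← hlen, t1, ← hstep, t0, hstep]
      ring
    · have hmin : min (i + 2) a.length = i + 2 := by omega
      have t1 : (a.take (i + 1)).sum = (a.take i).sum + a.getD i 0 := take_succ_sum a i hi
      have t2 : (a.take (i + 2)).sum = (a.take (i + 1)).sum + a.getD (i + 1) 0 :=
        take_succ_sum a (i + 1) (by omega)
      rw [if_neg hl, c0, c1, cm, hmin, t2, t1, ← hstep, t0, hstep]
      ring

-- ===== VERDICT (by name: the statement is the Claim_ definition above) =====
theorem mutateTheArray_spec : Claim_equal_mutateTheArray := by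
  intro n a _ hpre
  unfold Spec_mutateTheArray mutateTheArray mutateTheArray_alt
  by_cases hn : n < 2
  · simp only [if_pos hn]
  · rw [if_neg hn, if_neg hn]
    simp only []
    have hs : a.foldl (fun (s : List Int) (x : Int) => s ++ [s.getLastD 0 + x]) [0]
        = List.scanl (· + ·) 0 a := by
      simpa using fold_eq_scanl a [] 0
    rw [hs]
    rw [show (fun (b : List Int) (i : Nat) =>
      if i = 0 then b ++ [PySem.List.pyGetD a (↑i) 0 + PySem.List.pyGetD a (↑i + 1) 0]
      else if i = a.length - 1 then b ++ [PySem.List.pyGetD a (↑i) 0 + PySem.List.pyGetD a (↑i - 1) 0]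
      else b ++ [PySem.List.pyGetD a (↑i - 1) 0 + PySem.List.pyGetD a (↑i) 0 + PySem.List.pyGetD a (↑i + 1) 0])
      = (fun (b : List Int) (i : Nat) => b ++ [if i = 0 then PySem.List.pyGetD a (↑i) 0 + PySem.List.pyGetD a (↑i + 1) 0
          else if i = a.length - 1 then PySem.List.pyGetD a (↑i) 0 + PySem.List.pyGetD a (↑i - 1) 0
          else PySem.List.pyGetD a (↑i - 1) 0 + PySem.List.pyGetD a (↑i) 0 + PySem.List.pyGetD a (↑i + 1) 0])
      from by funext b i; split_ifs <;> rfl]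
    rw [PySem.List.foldl_append_singleton_eq_map, List.nil_append]
    rcases Nat.lt_or_ge a.length 2 with hlen | hlen
    · interval_cases h : a.length
      · simp [List.length_eq_zero_iff.mp h]
      · exact absurd ⟨by omega, h⟩ hpre
    · apply List.map_congr_left
      intro i hi
      rw [List.mem_range] at hi
      rw [scan_getD a 0 (min (i + 2) a.length) (by omega),
          scan_getD a 0 (max (i - 1) 0) (by omega)]
      rw [pointwise a i hlen hi]
      ring
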